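-- pv_equiv track=rewrite | github.com/b-zhu524/usaco_practice | aircowditioning/air.py | solve
-- ===== SOURCE A (Python) =====
-- def solve(d, n):
--     commands = 0
--
--     i = 0
--     while True:
--         while i < n and d[i] == 0:
--             i += 1
--         if i >= n:
--             break
--
--         elif d[i] > 0:
--             j = i
--             small = d[i]
--             while j < n and d[j] > 0:
--                 small = min(small, d[j])
--                 j += 1
--             commands += small
--             for k in range(i, j):
--                 d[k] -= small
--
--         else:
--             j = i
--             large = d[i]
--             while j < n and d[j] < 0:
--                 large = max(large, d[j])
--                 j += 1
--             commands += large
--             for k in range(i, j):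
--                 d[k] -= large
--     return commands
-- ===== SOURCE B (Python) =====
-- def solve(d, n):
--     # Single pass "skyline" sum of signed steps vs the previous same-sign element.
--     commands = 0
--     prev = 0
--     for i in range(n):
--         x = d[i]
--         if x > 0:
--             p = prev if prev > 0 else 0
--             if x > p:
--                 commands += x - p
--         elif x < 0:
--             p = prev if prev < 0 else 0
--             if x < p:
--                 commands += x - p
--         prev = x
--     return commands
-- ===== Notes on version B (the rewrite author's own statement) =====
-- stated objective: faster
-- what changed: A repeatedly finds a same-sign run, subtracts its extremum and rescans until everything is zero (O(n*V) passes); B is a single left-to-right pass adding, for each element, its signed step beyond the previous same-sign element (skyline decomposition). B does not mutate d, while A zeroes it in place; the equivalence is about the return value.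
import Mathlib
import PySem

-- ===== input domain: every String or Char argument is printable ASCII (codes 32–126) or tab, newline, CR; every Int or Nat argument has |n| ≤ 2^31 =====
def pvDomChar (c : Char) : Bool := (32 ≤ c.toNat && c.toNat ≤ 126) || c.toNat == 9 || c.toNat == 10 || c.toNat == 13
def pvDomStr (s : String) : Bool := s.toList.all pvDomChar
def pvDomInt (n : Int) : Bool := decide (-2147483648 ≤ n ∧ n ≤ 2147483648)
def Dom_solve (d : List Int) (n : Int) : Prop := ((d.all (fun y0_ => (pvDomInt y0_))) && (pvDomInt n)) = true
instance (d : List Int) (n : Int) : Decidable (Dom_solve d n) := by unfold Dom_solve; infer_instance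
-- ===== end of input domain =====

-- B replaces A's repeated run-reduction sweeps by one linear skyline pass; equivalence is about
-- the RETURN value only (Python A zeroes the list d in place, B leaves it untouched).

-- d[k] (in-range under Pre_, where 0 ≤ k < n ≤ len d)
def pvGet (d : List Int) (k : Int) : Int := PySem.List.pyGetD d k 0

-- ===== PORT A =====
-- `while i < n and d[i] == 0: i += 1`
def skipZeros (d : List Int) (n i : Int) : Int :=
  if h : i < n ∧ pvGet d i = 0 then skipZeros d n (i + 1) else i
termination_by (n - i).toNat
decreasing_by omega

-- `j = i; small = d[i]; while j < n and d[j] > 0: small = min(small, d[j]); j += 1`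
def findRunPos (d : List Int) (n j small : Int) : Int × Int :=
  if h : j < n ∧ pvGet d j > 0 then findRunPos d n (j + 1) (min small (pvGet d j)) else (j, small)
termination_by (n - j).toNat
decreasing_by omega

-- `j = i; large = d[i]; while j < n and d[j] < 0: large = max(large, d[j]); j += 1`
def findRunNeg (d : List Int) (n j large : Int) : Int × Int :=
  if h : j < n ∧ pvGet d j < 0 then findRunNeg d n (j + 1) (max large (pvGet d j)) else (j, large)
termination_by (n - j).toNat
decreasing_by omega

-- `for k in range(i, j): d[k] -= s`
def subRange (d : List Int) (i j s : Int) : List Int :=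
  (PySem.List.pyRange i j 1).foldl (fun d k => PySem.List.pySetD d k (pvGet d k - s)) d

-- Python's `while True` loop; the fuel is a termination guard only (each pass strictly
-- decreases the total absolute value of d[0:n]; pvMeasure d n + 1 is proven sufficient).
def outerA (fuel : Nat) (d : List Int) (n i commands : Int) : Int :=
  match fuel with
  | 0 => commands
  | fuel + 1 =>
    let i := skipZeros d n i
    if i ≥ n then commands
    else if pvGet d i > 0 then
      let r := findRunPos d n i (pvGet d i)
      outerA fuel (subRange d i r.1 r.2) n i (commands + r.2)
    else
      let r := findRunNeg d n i (pvGet d i)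
      outerA fuel (subRange d i r.1 r.2) n i (commands + r.2)

def pvMeasure (d : List Int) (n : Int) : Nat :=
  ((PySem.List.pyRange 0 n 1).map (fun k => (pvGet d k).natAbs)).sum

def solve (d : List Int) (n : Int) : Int := outerA (pvMeasure d n + 1) d n 0 0

-- ===== PORT B =====
-- loop body of Source B: state (commands, prev)
def bStep (d : List Int) (st : Int × Int) (i : Int) : Int × Int :=
  let x := pvGet d i
  let c :=
    if x > 0 then
      let p := if st.2 > 0 then st.2 else 0
      if x > p then st.1 + (x - p) else st.1
    else if x < 0 then
      let p := if st.2 < 0 then st.2 else 0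
      if x < p then st.1 + (x - p) else st.1
    else st.1
  (c, x)

def solve_alt (d : List Int) (n : Int) : Int :=
  ((PySem.List.pyRange 0 n 1).foldl (bStep d) (0, 0)).1

-- ===== PRECONDITION & SPEC =====
-- A raises IndexError as soon as i reaches len(d) while i < n, i.e. whenever n > len(d); B raises there too.
def Pre_solve (d : List Int) (n : Int) : Prop := n ≤ (d.length : Int)
instance (d : List Int) (n : Int) : Decidable (Pre_solve d n) := by unfold Pre_solve; infer_instance
def pvWitness_solve : List Int × Int := ([2, -1, 0, 3, 3, -2], 6)

def Spec_solve (d : List Int) (n : Int) (out : Int) : Prop := out = solve_alt d n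
instance (d : List Int) (n : Int) (out : Int) : Decidable (Spec_solve d n out) := by unfold Spec_solve; infer_instance

-- ===== CLAIM (what is proved, stated in full; the proofs are below) =====
def Claim_equal_solve : Prop := ∀ (d : List Int) (n : Int), Dom_solve d n → Pre_solve d n → Spec_solve d n (solve d n)

-- ===== LEMMAS AND PROOFS =====

-- the per-element signed skyline step
def stepG (p x : Int) : Int :=
  if x > 0 then (if x > max p 0 then x - max p 0 else 0)
  else if x < 0 then (if x < min p 0 then x - min p 0 else 0)
  else 0

-- skyline sum with previous element p
def G : Int → List Int → Int
  | _, [] => 0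
  | p, x :: xs => stepG p x + G x xs

lemma bStep_eq (d : List Int) (st : Int × Int) (i : Int) :
    bStep d st i = (st.1 + stepG st.2 (pvGet d i), pvGet d i) := by
  rcases st with ⟨c, p⟩
  simp only [bStep, stepG, max_def, min_def]
  split_ifs <;> simp_all <;> omega

lemma foldl_bStep (d : List Int) (l : List Int) :
    ∀ (c p : Int), (l.foldl (bStep d) (c, p)).1 = c + G p (l.map (pvGet d)) := by
  induction l with
  | nil => intro c p; simp [G]
  | cons x t ih =>
    intro c p
    rw [List.foldl_cons, bStep_eq]
    simp only [List.map_cons, G]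
    rw [ih]; ring

lemma solve_alt_eq_G (d : List Int) (n : Int) :
    solve_alt d n = G 0 ((PySem.List.pyRange 0 n 1).map (pvGet d)) := by
  unfold solve_alt
  rw [foldl_bStep]; ring

-- ---------- generic facts about G ----------

lemma stepG_zero (p : Int) : stepG p 0 = 0 := by simp [stepG]

lemma G_zeros_prefix (z xs : List Int) (hz : ∀ x ∈ z, x = 0) :
    G 0 (z ++ xs) = G 0 xs := by
  induction z with
  | nil => rfl
  | cons a t ih =>
    have ha : a = 0 := hz a (by simp)
    subst ha
    simp only [List.cons_append, G, stepG_zero, zero_add]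
    exact ih (fun x hx => hz x (by simp [hx]))

lemma G_head_nonpos (xs : List Int) (p q : Int) (hp : 0 ≤ p) (hq : 0 ≤ q)
    (h : ∀ y, xs.head? = some y → y ≤ 0) : G p xs = G q xs := by
  cases xs with
  | nil => rfl
  | cons x t =>
    have hx : x ≤ 0 := h x rfl
    simp only [G]
    have : stepG p x = stepG q x := by
      simp only [stepG, max_def, min_def]
      split_ifs <;> omega
    rw [this]

lemma G_head_nonneg (xs : List Int) (p q : Int) (hp : p ≤ 0) (hq : q ≤ 0)
    (h : ∀ y, xs.head? = some y → 0 ≤ y) : G p xs = G q xs := by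
  cases xs with
  | nil => rfl
  | cons x t =>
    have hx : 0 ≤ x := h x rfl
    simp only [G]
    have : stepG p x = stepG q x := by
      simp only [stepG, max_def, min_def]
      split_ifs <;> omega
    rw [this]

lemma stepG_shift_pos (p x s : Int) (hs : 0 < s) (hsx : s ≤ x) (hsp : s ≤ p) :
    stepG p x = stepG (p - s) (x - s) := by
  simp only [stepG, max_def, min_def]
  split_ifs <;> omega

lemma posRunTail (s : Int) (hs : 0 < s) (rest : List Int)
    (hrest : ∀ y, rest.head? = some y → y ≤ 0) :
    ∀ (run : List Int) (p : Int), (∀ x ∈ run, s ≤ x) → s ≤ p →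
      G p (run ++ rest) = G (p - s) (run.map (fun x => x - s) ++ rest) := by
  intro run
  induction run with
  | nil =>
    intro p _ hp
    exact G_head_nonpos rest p (p - s) (by omega) (by omega) hrest
  | cons x t ih =>
    intro p hall hp
    have hx : s ≤ x := hall x (by simp)
    simp only [List.map_cons, List.cons_append, G]
    rw [← stepG_shift_pos p x s hs hx hp,
        ih x (fun y hy => hall y (by simp [hy])) hx]

lemma posRunMain (s x : Int) (t rest : List Int) (hs : 0 < s)
    (hall : ∀ y ∈ x :: t, s ≤ y)
    (hrest : ∀ y, rest.head? = some y → y ≤ 0) :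
    G 0 ((x :: t) ++ rest) = s + G 0 ((x :: t).map (fun y => y - s) ++ rest) := by
  have hx : s ≤ x := hall x (by simp)
  simp only [List.map_cons, List.cons_append, G]
  have h1 : stepG 0 x = s + stepG 0 (x - s) := by
    simp only [stepG, max_def, min_def]
    split_ifs <;> omega
  rw [h1, posRunTail s hs rest hrest t x (fun y hy => hall y (by simp [hy])) hx]
  ring

lemma stepG_shift_neg (p x s : Int) (hs : s < 0) (hsx : x ≤ s) (hsp : p ≤ s) :
    stepG p x = stepG (p - s) (x - s) := by
  simp only [stepG, max_def, min_def]
  split_ifs <;> omega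

lemma negRunTail (s : Int) (hs : s < 0) (rest : List Int)
    (hrest : ∀ y, rest.head? = some y → 0 ≤ y) :
    ∀ (run : List Int) (p : Int), (∀ x ∈ run, x ≤ s) → p ≤ s →
      G p (run ++ rest) = G (p - s) (run.map (fun x => x - s) ++ rest) := by
  intro run
  induction run with
  | nil =>
    intro p _ hp
    exact G_head_nonneg rest p (p - s) (by omega) (by omega) hrest
  | cons x t ih =>
    intro p hall hp
    have hx : x ≤ s := hall x (by simp)
    simp only [List.map_cons, List.cons_append, G]
    rw [← stepG_shift_neg p x s hs hx hp,
        ih x (fun y hy => hall y (by simp [hy])) hx]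

lemma negRunMain (s x : Int) (t rest : List Int) (hs : s < 0)
    (hall : ∀ y ∈ x :: t, y ≤ s)
    (hrest : ∀ y, rest.head? = some y → 0 ≤ y) :
    G 0 ((x :: t) ++ rest) = s + G 0 ((x :: t).map (fun y => y - s) ++ rest) := by
  have hx : x ≤ s := hall x (by simp)
  simp only [List.map_cons, List.cons_append, G]
  have h1 : stepG 0 x = s + stepG 0 (x - s) := by
    simp only [stepG, max_def, min_def]
    split_ifs <;> omega
  rw [h1, negRunTail s hs rest hrest t x (fun y hy => hall y (by simp [hy])) hx]
  ring

-- ---------- specs of A's helpers ----------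

lemma skipZeros_spec (d : List Int) (n : Int) :
    ∀ (m : Nat) (i : Int), (n - i).toNat ≤ m →
      i ≤ skipZeros d n i ∧
      (∀ k, i ≤ k → k < skipZeros d n i → pvGet d k = 0) ∧
      (skipZeros d n i < n → pvGet d (skipZeros d n i) ≠ 0) ∧
      (i ≤ n → skipZeros d n i ≤ n) := by
  intro m
  induction m with
  | zero =>
    intro i hm
    rw [skipZeros]
    split_ifs with h
    · omega
    · exact ⟨le_refl i, fun k h1 h2 => absurd h1 (by omega),
        fun hlt => by simpa using fun hz => h ⟨hlt, hz⟩, fun h => h⟩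
  | succ m ih =>
    intro i hm
    rw [skipZeros]
    split_ifs with h
    · obtain ⟨h1, h2, h3, h4⟩ := ih (i + 1) (by omega)
      refine ⟨by omega, ?_, h3, fun _ => h4 (by omega)⟩
      intro k hk1 hk2
      rcases eq_or_lt_of_le hk1 with rfl | hk
      · exact h.2
      · exact h2 k (by omega) hk2
    · exact ⟨le_refl i, fun k h1 h2 => absurd h1 (by omega),
        fun hlt => by simpa using fun hz => h ⟨hlt, hz⟩, fun h => h⟩

lemma findRunPos_spec (d : List Int) (n : Int) :
    ∀ (m : Nat) (j s0 : Int), (n - j).toNat ≤ m → j ≤ n →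
      j ≤ (findRunPos d n j s0).1 ∧
      (findRunPos d n j s0).1 ≤ n ∧
      (findRunPos d n j s0).2 ≤ s0 ∧
      (∀ k, j ≤ k → k < (findRunPos d n j s0).1 →
        (findRunPos d n j s0).2 ≤ pvGet d k ∧ 0 < pvGet d k) ∧
      ((findRunPos d n j s0).1 < n → ¬ pvGet d (findRunPos d n j s0).1 > 0) ∧
      (0 < s0 → 0 < (findRunPos d n j s0).2) := by
  intro m
  induction m with
  | zero =>
    intro j s0 hm hj
    rw [findRunPos]
    split_ifs with h
    · omega
    · exact ⟨le_refl j, hj, le_refl s0,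
        fun k h1 h2 => absurd h1 (by omega),
        fun hlt => by simpa using fun hz => h ⟨hlt, hz⟩, fun h => h⟩
  | succ m ih =>
    intro j s0 hm hj
    rw [findRunPos]
    split_ifs with h
    · obtain ⟨h1, h2, h3, h4, h5, h6⟩ := ih (j + 1) (min s0 (pvGet d j)) (by omega) (by omega)
      refine ⟨by omega, h2, by omega, ?_, h5, fun hs0 => h6 (by omega)⟩
      intro k hk1 hk2
      rcases eq_or_lt_of_le hk1 with rfl | hk
      · exact ⟨by omega, h.2⟩
      · exact h4 k (by omega) hk2
    · exact ⟨le_refl j, hj, le_refl s0,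
        fun k h1 h2 => absurd h1 (by omega),
        fun hlt => by simpa using fun hz => h ⟨hlt, hz⟩, fun h => h⟩

lemma findRunPos_progress (d : List Int) (n j s0 : Int) (h1 : j < n) (h2 : pvGet d j > 0) :
    j < (findRunPos d n j s0).1 := by
  rw [findRunPos]
  rw [dif_pos ⟨h1, h2⟩]
  have := (findRunPos_spec d n (n - (j + 1)).toNat (j + 1) (min s0 (pvGet d j))
    (le_refl _) (by omega)).1
  omega

lemma findRunNeg_spec (d : List Int) (n : Int) :
    ∀ (m : Nat) (j s0 : Int), (n - j).toNat ≤ m → j ≤ n →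
      j ≤ (findRunNeg d n j s0).1 ∧
      (findRunNeg d n j s0).1 ≤ n ∧
      s0 ≤ (findRunNeg d n j s0).2 ∧
      (∀ k, j ≤ k → k < (findRunNeg d n j s0).1 →
        pvGet d k ≤ (findRunNeg d n j s0).2 ∧ pvGet d k < 0) ∧
      ((findRunNeg d n j s0).1 < n → ¬ pvGet d (findRunNeg d n j s0).1 < 0) ∧
      (s0 < 0 → (findRunNeg d n j s0).2 < 0) := by
  intro m
  induction m with
  | zero =>
    intro j s0 hm hj
    rw [findRunNeg]
    split_ifs with h
    · omega
    · exact ⟨le_refl j, hj, le_refl s0,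
        fun k h1 h2 => absurd h1 (by omega),
        fun hlt => by simpa using fun hz => h ⟨hlt, hz⟩, fun h => h⟩
  | succ m ih =>
    intro j s0 hm hj
    rw [findRunNeg]
    split_ifs with h
    · obtain ⟨h1, h2, h3, h4, h5, h6⟩ := ih (j + 1) (max s0 (pvGet d j)) (by omega) (by omega)
      refine ⟨by omega, h2, by omega, ?_, h5, fun hs0 => ?_⟩
      · intro k hk1 hk2
        rcases eq_or_lt_of_le hk1 with rfl | hk
        · exact ⟨by omega, h.2⟩
        · exact h4 k (by omega) hk2
      · have := h6 (by omega)
        omega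
    · exact ⟨le_refl j, hj, le_refl s0,
        fun k h1 h2 => absurd h1 (by omega),
        fun hlt => by simpa using fun hz => h ⟨hlt, hz⟩, fun h => h⟩

lemma findRunNeg_progress (d : List Int) (n j s0 : Int) (h1 : j < n) (h2 : pvGet d j < 0) :
    j < (findRunNeg d n j s0).1 := by
  rw [findRunNeg]
  rw [dif_pos ⟨h1, h2⟩]
  have := (findRunNeg_spec d n (n - (j + 1)).toNat (j + 1) (max s0 (pvGet d j))
    (le_refl _) (by omega)).1
  omega

-- subRange step forms
lemma subRange_nil (d : List Int) (i j s : Int) (h : j ≤ i) : subRange d i j s = d := by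
  unfold subRange
  rw [PySem.List.pyRange_one_eq_nil h]
  rfl

lemma subRange_cons (d : List Int) (i j s : Int) (h : i < j) :
    subRange d i j s = subRange (PySem.List.pySetD d i (pvGet d i - s)) (i + 1) j s := by
  unfold subRange
  rw [PySem.List.pyRange_one_cons h, List.foldl_cons]

lemma length_subRange (d : List Int) (i j s : Int) :
    (subRange d i j s).length = d.length := by
  unfold subRange
  induction (PySem.List.pyRange i j 1) generalizing d with
  | nil => rfl
  | cons a t ih => rw [List.foldl_cons, ih, PySem.List.length_pySetD]

lemma pvGet_set (d : List Int) (i k v : Int) (hi : 0 ≤ i) (hk : 0 ≤ k) :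
    pvGet (PySem.List.pySetD d i v) k =
      if k = i ∧ i < (d.length : Int) then v else pvGet d k := by
  rw [PySem.List.pySetD_of_nonneg d v hi]
  unfold pvGet
  rw [PySem.List.pyGetD_of_nonneg _ _ hk, PySem.List.pyGetD_of_nonneg _ _ hk]
  simp only [List.getD]
  rw [List.getElem?_set]
  split_ifs with h1 h2 h2 <;> simp_all <;> omega

lemma subRange_get (s : Int) :
    ∀ (m : Nat) (d : List Int) (i j : Int), (j - i).toNat ≤ m → 0 ≤ i → j ≤ (d.length : Int) →
      ∀ k, 0 ≤ k →
        pvGet (subRange d i j s) k = if i ≤ k ∧ k < j then pvGet d k - s else pvGet d k := by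
  intro m
  induction m with
  | zero =>
    intro d i j hm hi hj k hk
    rw [subRange_nil d i j s (by omega)]
    split_ifs with h
    · omega
    · rfl
  | succ m ih =>
    intro d i j hm hi hj k hk
    by_cases hij : i < j
    · rw [subRange_cons d i j s hij]
      have hlen : (PySem.List.pySetD d i (pvGet d i - s)).length = d.length := by
        rw [PySem.List.length_pySetD]
      rw [ih (PySem.List.pySetD d i (pvGet d i - s)) (i + 1) j (by omega) (by omega)
        (by rw [hlen]; exact hj) k hk]
      rw [pvGet_set d i k (pvGet d i - s) hi hk]
      by_cases hki : k = i
      · subst hki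
        split_ifs <;> omega
      · split_ifs <;> omega
    · rw [subRange_nil d i j s (by omega)]
      split_ifs with h
      · omega
      · rfl

-- ---------- measure decrease ----------

lemma sum_natAbs_lt (d d' : List Int) (i j : Int)
    (hij : i < j)
    (hle : ∀ k, i ≤ k → k < j → (pvGet d' k).natAbs < (pvGet d k).natAbs) :
    (((PySem.List.pyRange i j 1).map (fun k => (pvGet d' k).natAbs)).sum <
      ((PySem.List.pyRange i j 1).map (fun k => (pvGet d k).natAbs)).sum) := by
  rw [PySem.List.pyRange_one_cons hij]
  simp only [List.map_cons, List.sum_cons]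
  have h1 : (pvGet d' i).natAbs < (pvGet d i).natAbs := hle i (le_refl i) hij
  have h2 : ((PySem.List.pyRange (i+1) j 1).map (fun k => (pvGet d' k).natAbs)).sum ≤
      ((PySem.List.pyRange (i+1) j 1).map (fun k => (pvGet d k).natAbs)).sum := by
    apply List.sum_le_sum
    intro k hk
    rw [PySem.List.mem_pyRange_one] at hk
    exact le_of_lt (hle k (by omega) (by omega))
  omega

lemma sum_natAbs_eq (d d' : List Int) (a b : Int)
    (heq : ∀ k, a ≤ k → k < b → pvGet d' k = pvGet d k) :
    (((PySem.List.pyRange a b 1).map (fun k => (pvGet d' k).natAbs)).sum =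
      ((PySem.List.pyRange a b 1).map (fun k => (pvGet d k).natAbs)).sum) := by
  congr 1
  apply List.map_congr_left
  intro k hk
  rw [PySem.List.mem_pyRange_one] at hk
  rw [heq k hk.1 hk.2]

lemma measure_sub (d : List Int) (n i j s : Int)
    (h0 : 0 ≤ i) (hij : i < j) (hjn : j ≤ n) (hlen : n ≤ (d.length : Int))
    (h : ∀ k, i ≤ k → k < j → (pvGet d k - s).natAbs < (pvGet d k).natAbs) :
    pvMeasure (subRange d i j s) n < pvMeasure d n := by
  have hget := subRange_get s (j - i).toNat d i j (le_refl _) h0 (by omega)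
  unfold pvMeasure
  rw [PySem.List.pyRange_one_append 0 i n h0 (by omega),
      PySem.List.pyRange_one_append i j n (by omega) (by omega)]
  simp only [List.map_append, List.sum_append]
  have e1 := sum_natAbs_eq d (subRange d i j s) 0 i (fun k hk1 hk2 => by
    rw [hget k hk1, if_neg (by omega)])
  have e2 := sum_natAbs_eq d (subRange d i j s) j n (fun k hk1 hk2 => by
    rw [hget k (by omega), if_neg (by omega)])
  have e3 := sum_natAbs_lt d (subRange d i j s) i j hij (fun k hk1 hk2 => by
    rw [hget k (by omega)]; rw [if_pos ⟨hk1, hk2⟩]; exact h k hk1 hk2)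
  omega

-- ---------- segment decomposition after one pass ----------

lemma seg_split (d : List Int) (a m b : Int) (h1 : a ≤ m) (h2 : m ≤ b) :
    (PySem.List.pyRange a b 1).map (pvGet d) =
      (PySem.List.pyRange a m 1).map (pvGet d) ++ (PySem.List.pyRange m b 1).map (pvGet d) := by
  rw [PySem.List.pyRange_one_append a m b h1 h2, List.map_append]

lemma seg_congr (d d' : List Int) (a b : Int)
    (h : ∀ k, a ≤ k → k < b → pvGet d' k = pvGet d k) :
    (PySem.List.pyRange a b 1).map (pvGet d') = (PySem.List.pyRange a b 1).map (pvGet d) := by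
  apply List.map_congr_left
  intro k hk
  rw [PySem.List.mem_pyRange_one] at hk
  exact h k hk.1 hk.2

lemma seg_sub (d : List Int) (i j s : Int) (h0 : 0 ≤ i)
    (hlen : j ≤ (d.length : Int)) :
    (PySem.List.pyRange i j 1).map (pvGet (subRange d i j s)) =
      ((PySem.List.pyRange i j 1).map (pvGet d)).map (fun x => x - s) := by
  rw [List.map_map]
  apply List.map_congr_left
  intro k hk
  rw [PySem.List.mem_pyRange_one] at hk
  have := subRange_get s (j - i).toNat d i j (le_refl _) h0 hlen k (by omega)
  simp only [Function.comp]
  rw [this, if_pos ⟨hk.1, hk.2⟩]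

-- ---------- main induction ----------

lemma outerA_eq (fuel : Nat) :
    ∀ (d : List Int) (i c : Int) (n : Int), 0 ≤ i → i ≤ n → n ≤ (d.length : Int) →
      pvMeasure d n < fuel →
      outerA fuel d n i c = c + G 0 ((PySem.List.pyRange i n 1).map (pvGet d)) := by
  induction fuel with
  | zero => intro d i c n _ _ _ hf; omega
  | succ fuel ih =>
    intro d i c n hi hin hlen hf
    obtain ⟨hsk1, hsk2, hsk3, hsk4⟩ := skipZeros_spec d n (n - i).toNat i (le_refl _)
    set i' := skipZeros d n i with hi'
    have hi'n : i' ≤ n := hsk4 hin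
    have hi'0 : 0 ≤ i' := by omega
    have hzeros : G 0 ((PySem.List.pyRange i n 1).map (pvGet d)) =
        G 0 ((PySem.List.pyRange i' n 1).map (pvGet d)) := by
      rw [seg_split d i i' n hsk1 hi'n]
      apply G_zeros_prefix
      intro x hx
      simp only [List.mem_map] at hx
      obtain ⟨k, hk, rfl⟩ := hx
      rw [PySem.List.mem_pyRange_one] at hk
      exact hsk2 k hk.1 hk.2
    rw [outerA]
    simp only [← hi']
    by_cases hend : i' ≥ n
    · rw [if_pos hend]
      have : i' = n := by omega
      rw [hzeros, this, PySem.List.pyRange_one_eq_nil (le_refl n)]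
      simp [G]
    · rw [if_neg hend]
      have hlt : i' < n := by omega
      have hne : pvGet d i' ≠ 0 := hsk3 hlt
      by_cases hpos : pvGet d i' > 0
      · rw [if_pos hpos]
        obtain ⟨hr1, hr2, hr3, hr4, hr5, hr6⟩ :=
          findRunPos_spec d n (n - i').toNat i' (pvGet d i') (le_refl _) (by omega)
        set j := (findRunPos d n i' (pvGet d i')).1 with hj
        set s := (findRunPos d n i' (pvGet d i')).2 with hs
        have hprog : i' < j := findRunPos_progress d n i' (pvGet d i') hlt hpos
        have hspos : 0 < s := hr6 hpos
        have hjlen : j ≤ (d.length : Int) := by omega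
        have hmeas : pvMeasure (subRange d i' j s) n < pvMeasure d n := by
          apply measure_sub d n i' j s hi'0 hprog hr2 hlen
          intro k hk1 hk2
          have := hr4 k hk1 hk2
          omega
        have hlen' : n ≤ ((subRange d i' j s).length : Int) := by
          rw [length_subRange]; exact hlen
        rw [ih (subRange d i' j s) i' (c + s) n hi'0 hi'n hlen' (by omega)]
        have hget := subRange_get s (j - i').toNat d i' j (le_refl _) hi'0 hjlen
        have hsegsplit : (PySem.List.pyRange i' n 1).map (pvGet (subRange d i' j s)) =
            ((PySem.List.pyRange i' j 1).map (pvGet d)).map (fun x => x - s) ++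
              (PySem.List.pyRange j n 1).map (pvGet d) := by
          rw [seg_split (subRange d i' j s) i' j n (by omega) hr2,
              seg_sub d i' j s hi'0 hjlen,
              seg_congr d (subRange d i' j s) j n (fun k hk1 hk2 => by
                rw [hget k (by omega), if_neg (by omega)])]
        rw [hsegsplit, hzeros, seg_split d i' j n (by omega) hr2]
        have hrun : ∃ x t, (PySem.List.pyRange i' j 1).map (pvGet d) = x :: t := by
          rw [PySem.List.pyRange_one_cons hprog, List.map_cons]
          exact ⟨_, _, rfl⟩
        obtain ⟨x, t, hxt⟩ := hrun
        rw [hxt]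
        have hall : ∀ y ∈ x :: t, s ≤ y := by
          rw [← hxt]
          intro y hy
          simp only [List.mem_map] at hy
          obtain ⟨k, hk, rfl⟩ := hy
          rw [PySem.List.mem_pyRange_one] at hk
          exact (hr4 k hk.1 hk.2).1
        have hrest : ∀ y, ((PySem.List.pyRange j n 1).map (pvGet d)).head? = some y → y ≤ 0 := by
          intro y hy
          by_cases hjn' : j < n
          · rw [PySem.List.pyRange_one_cons hjn', List.map_cons] at hy
            simp only [List.head?_cons, Option.some_inj] at hy
            have := hr5 hjn'
            omega
          · rw [PySem.List.pyRange_one_eq_nil (by omega)] at hy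
            simp at hy
        rw [posRunMain s x t ((PySem.List.pyRange j n 1).map (pvGet d)) hspos hall hrest]
        ring
      · rw [if_neg hpos]
        have hneg : pvGet d i' < 0 := by omega
        obtain ⟨hr1, hr2, hr3, hr4, hr5, hr6⟩ :=
          findRunNeg_spec d n (n - i').toNat i' (pvGet d i') (le_refl _) (by omega)
        set j := (findRunNeg d n i' (pvGet d i')).1 with hj
        set s := (findRunNeg d n i' (pvGet d i')).2 with hs
        have hprog : i' < j := findRunNeg_progress d n i' (pvGet d i') hlt hneg
        have hsneg : s < 0 := hr6 hneg
        have hjlen : j ≤ (d.length : Int) := by omega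
        have hmeas : pvMeasure (subRange d i' j s) n < pvMeasure d n := by
          apply measure_sub d n i' j s hi'0 hprog hr2 hlen
          intro k hk1 hk2
          have := hr4 k hk1 hk2
          omega
        have hlen' : n ≤ ((subRange d i' j s).length : Int) := by
          rw [length_subRange]; exact hlen
        rw [ih (subRange d i' j s) i' (c + s) n hi'0 hi'n hlen' (by omega)]
        have hget := subRange_get s (j - i').toNat d i' j (le_refl _) hi'0 hjlen
        have hsegsplit : (PySem.List.pyRange i' n 1).map (pvGet (subRange d i' j s)) =
            ((PySem.List.pyRange i' j 1).map (pvGet d)).map (fun x => x - s) ++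
              (PySem.List.pyRange j n 1).map (pvGet d) := by
          rw [seg_split (subRange d i' j s) i' j n (by omega) hr2,
              seg_sub d i' j s hi'0 hjlen,
              seg_congr d (subRange d i' j s) j n (fun k hk1 hk2 => by
                rw [hget k (by omega), if_neg (by omega)])]
        rw [hsegsplit, hzeros, seg_split d i' j n (by omega) hr2]
        have hrun : ∃ x t, (PySem.List.pyRange i' j 1).map (pvGet d) = x :: t := by
          rw [PySem.List.pyRange_one_cons hprog, List.map_cons]
          exact ⟨_, _, rfl⟩
        obtain ⟨x, t, hxt⟩ := hrun
        rw [hxt]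
        have hall : ∀ y ∈ x :: t, y ≤ s := by
          rw [← hxt]
          intro y hy
          simp only [List.mem_map] at hy
          obtain ⟨k, hk, rfl⟩ := hy
          rw [PySem.List.mem_pyRange_one] at hk
          exact (hr4 k hk.1 hk.2).1
        have hrest : ∀ y, ((PySem.List.pyRange j n 1).map (pvGet d)).head? = some y → 0 ≤ y := by
          intro y hy
          by_cases hjn' : j < n
          · rw [PySem.List.pyRange_one_cons hjn', List.map_cons] at hy
            simp only [List.head?_cons, Option.some_inj] at hy
            have := hr5 hjn'
            omega
          · rw [PySem.List.pyRange_one_eq_nil (by omega)] at hy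
            simp at hy
        rw [negRunMain s x t ((PySem.List.pyRange j n 1).map (pvGet d)) hsneg hall hrest]
        ring

-- ===== VERDICT (by name: the statement is the Claim_ definition above) =====
theorem solve_spec : Claim_equal_solve := by
  intro d n _ hpre
  unfold Spec_solve
  unfold Pre_solve at hpre
  by_cases hn : 0 ≤ n
  · unfold solve
    rw [outerA_eq (pvMeasure d n + 1) d 0 0 n (le_refl 0) hn hpre (by omega)]
    rw [solve_alt_eq_G]
    ring
  · -- n < 0: A breaks immediately, B's range is empty
    unfold solve outerA
    obtain ⟨hsk1, _, _, _⟩ := skipZeros_spec d n (n - 0).toNat 0 (le_refl _)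
    rw [if_pos (by omega : skipZeros d n 0 ≥ n)]
    unfold solve_alt
    rw [PySem.List.pyRange_one_eq_nil (by omega)]
    rfl
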